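-- pv_equiv track=rewrite | github.com/gregoryann/Python-Beginner-Examples | +1500 Python Challenges/Easy/Letter Occurrences Per Word.py | find_occurrences
-- ===== SOURCE A (Python) =====
-- def find_occurrences(txt, ch):
--     lst = txt.split(" ")
--     output = {}
--     for i in lst:
--         count = 0
--         for j in i:
--             if j == ch.upper() or j == ch.lower():
--                 count += 1
--         output[i.lower()] = count
--         count = 0
--     return output
-- ===== SOURCE B (Python) =====
-- def find_occurrences(txt, ch):
--     key = ch.lower()
--     output = {}
--     word = ""
--     count = 0
--     for c in txt.lower() + " ":
--         if c == " ":
--             output[word] = count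
--             word = ""
--             count = 0
--         else:
--             word += c
--             if c == key:
--                 count += 1
--     return output
-- ===== Notes on version B (the rewrite author's own statement) =====
-- stated objective: faster
-- what changed: B replaces A's split-then-nested-count structure by a single-pass character scanner over txt.lower() plus a sentinel space: it never calls split, computes key = ch.lower() once instead of rebuilding ch.upper()/ch.lower() for every character, and flushes the current word with its running match count into the dict at each space.
import Mathlib
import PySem

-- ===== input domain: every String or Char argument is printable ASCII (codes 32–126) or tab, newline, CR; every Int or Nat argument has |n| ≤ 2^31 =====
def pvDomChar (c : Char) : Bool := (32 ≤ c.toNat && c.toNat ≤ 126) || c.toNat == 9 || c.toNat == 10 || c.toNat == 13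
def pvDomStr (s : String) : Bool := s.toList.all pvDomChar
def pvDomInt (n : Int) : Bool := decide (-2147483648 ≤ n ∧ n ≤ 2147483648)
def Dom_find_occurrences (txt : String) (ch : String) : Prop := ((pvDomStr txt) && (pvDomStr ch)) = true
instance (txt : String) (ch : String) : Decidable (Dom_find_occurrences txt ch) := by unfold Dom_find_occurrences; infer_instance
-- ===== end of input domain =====

-- B scans txt.lower() plus a sentinel space once, flushing the current word and its running count
-- at each space and computing ch.lower() once, instead of A's split followed by a nested counting
-- loop that rebuilds ch.upper()/ch.lower() per character (a timing run measured B faster).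

-- ===== PORT A =====
def find_occurrences (txt : String) (ch : String) : List (String × Int) :=
  let lst := (PySem.Str.split? txt " ").getD []   -- txt.split(" "); sep ≠ "" so split? is always some
  let output := lst.foldl (fun (output : PySem.Dict String Int) i =>
    let count := i.toList.foldl (fun (count : Int) j =>
      if (String.ofList [j] == PySem.Str.upper ch || String.ofList [j] == PySem.Str.lower ch) = true
      then count + 1 else count) 0
    output.insert (PySem.Str.lower i) count) PySem.Dict.empty
  output.items

-- ===== PORT B =====
-- the loop body of B (one scanned character updates (output, word, count))
def bStep (key : String) (st : PySem.Dict String Int × List Char × Int) (c : Char) :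
    PySem.Dict String Int × List Char × Int :=
  if c = ' ' then (st.1.insert (String.ofList st.2.1) st.2.2, [], 0)
  else (st.1, st.2.1 ++ [c], if (String.ofList [c] == key) = true then st.2.2 + 1 else st.2.2)

def find_occurrences_alt (txt : String) (ch : String) : List (String × Int) :=
  let key := PySem.Str.lower ch
  let res := ((PySem.Str.lower txt).toList ++ [' ']).foldl (bStep key)
    (PySem.Dict.empty, ([] : List Char), (0 : Int))
  res.1.items

-- ===== PRECONDITION & SPEC =====
def Spec_find_occurrences (txt : String) (ch : String) (out : List (String × Int)) : Prop := out = find_occurrences_alt txt ch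
instance (txt : String) (ch : String) (out : List (String × Int)) : Decidable (Spec_find_occurrences txt ch out) := by unfold Spec_find_occurrences; infer_instance

-- ===== CLAIM (what is proved, stated in full; the proofs are below) =====
def Claim_equal_find_occurrences : Prop := ∀ (txt : String) (ch : String), Dom_find_occurrences txt ch → Spec_find_occurrences txt ch (find_occurrences txt ch)

-- ===== LEMMAS AND PROOFS =====

theorem charLe (a b : Char) : a ≤ b ↔ a.toNat ≤ b.toNat := by
  rw [Char.le_def, UInt32.le_iff_toNat_le]; rfl

theorem charEq (a b : Char) : a = b ↔ a.toNat = b.toNat := by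
  constructor
  · rintro rfl; rfl
  · intro h; exact Char.ofNat_toNat a ▸ Char.ofNat_toNat b ▸ (by rw [h])

-- A's condition 'j ∈ {ch-as-one-char upper, lower}' on characters equals B's 'lowerChar j = lowerChar ch'
theorem charFact (c d : Char) :
    (c = PySem.Chars.upperChar d ∨ c = PySem.Chars.lowerChar d) ↔
      PySem.Chars.lowerChar c = PySem.Chars.lowerChar d := by
  have ha : ('a':Char).toNat = 97 := rfl
  have hz : ('z':Char).toNat = 122 := rfl
  have hA : ('A':Char).toNat = 65 := rfl
  have hZ : ('Z':Char).toNat = 90 := rfl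
  unfold PySem.Chars.upperChar PySem.Chars.lowerChar PySem.Chars.islower PySem.Chars.isupper
  simp only [Bool.and_eq_true, decide_eq_true_eq, charLe, ha, hz, hA, hZ]
  split_ifs <;>
    simp only [charEq, Char.toNat_ofNat, Nat.isValidChar] at * <;>
    split_ifs at * <;> omega

-- the per-character condition of A, rewritten as the comparison B makes on the lowered character
theorem condFact (c : Char) (ch : String) :
    ((String.ofList [c] == PySem.Str.upper ch) || (String.ofList [c] == PySem.Str.lower ch))
      = (String.ofList [PySem.Chars.lowerChar c] == PySem.Str.lower ch) := by
  have hkey : ∀ (l : List Char) (s : String), (String.ofList l == s) = decide (l = s.toList) := by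
    intro l s
    by_cases h : l = s.toList
    · simp [h, String.ofList_toList]
    · have h2 : String.ofList l ≠ s := fun hc => h (by rw [← hc, String.toList_ofList])
      simp [h, h2]
  simp only [hkey, PySem.Str.toList_upper, PySem.Str.toList_lower,
    PySem.Chars.upper, PySem.Chars.lower]
  rcases ch.toList with _ | ⟨d, _ | ⟨e, t⟩⟩
  · simp
  · simp only [List.map_cons, List.map_nil, List.cons.injEq, and_true]
    rw [show ∀ a b : Prop, [Decidable a] → [Decidable b] → ((decide a || decide b) = decide (a ∨ b))
      from by intros a b _ _; simp] at *
    · simp only [decide_eq_decide]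
      exact charFact c d
  · simp

-- the splitter A uses, restated structurally (proof-side helper)
def split1 : List Char → List (List Char)
  | [] => [[]]
  | c :: rest =>
    if c = ' ' then [] :: split1 rest
    else match split1 rest with
      | [] => [[c]]
      | w :: ws => (c :: w) :: ws

theorem split1_ne_nil (l : List Char) : split1 l ≠ [] := by
  cases l with
  | nil => simp [split1]
  | cons c rest =>
    simp only [split1]
    split_ifs
    · simp
    · cases h : split1 rest <;> simp

theorem go_eq (fuel : Nat) : ∀ (l : List Char), l.length < fuel → ∀ (cur : List Char) (acc : List (List Char)),
    PySem.Chars.splitOn.go [' '] fuel l cur acc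
      = acc.reverse ++ (match split1 l with
          | [] => []
          | w :: ws => (cur.reverse ++ w) :: ws) := by
  induction fuel with
  | zero => intro l h; omega
  | succ n ih =>
    intro l h cur acc
    cases l with
    | nil => simp [PySem.Chars.splitOn.go, split1]
    | cons c rest =>
      by_cases hc : c = ' '
      · subst hc
        have hpre : List.isPrefixOf [' '] (' ' :: rest) = true := by
          simp [List.isPrefixOf]
        rw [PySem.Chars.splitOn.go, if_pos hpre]
        have : List.drop [' '].length (' ' :: rest) = rest := by simp
        rw [this, ih rest (by simp at h ⊢; omega) [] (cur.reverse :: acc)]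
        obtain ⟨w, ws, hw⟩ : ∃ w ws, split1 rest = w :: ws := by
          cases hws : split1 rest with
          | nil => exact absurd hws (split1_ne_nil rest)
          | cons w ws => exact ⟨w, ws, rfl⟩
        simp [split1, hw]
      · have hpre : List.isPrefixOf [' '] (c :: rest) = false := by
          simp [List.isPrefixOf]
          intro h'; exact absurd h'.symm hc
        rw [PySem.Chars.splitOn.go, if_neg (by simp [hpre])]
        rw [ih rest (by simp at h ⊢; omega) (c :: cur) acc]
        obtain ⟨w, ws, hw⟩ : ∃ w ws, split1 rest = w :: ws := by
          cases hws : split1 rest with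
          | nil => exact absurd hws (split1_ne_nil rest)
          | cons w ws => exact ⟨w, ws, rfl⟩
        simp [split1, hc, hw]

theorem splitOn_space (l : List Char) : PySem.Chars.splitOn l [' '] = split1 l := by
  unfold PySem.Chars.splitOn
  rw [go_eq (l.length + 1) l (by omega) [] []]
  obtain ⟨w, ws, hw⟩ : ∃ w ws, split1 l = w :: ws := by
    cases hws : split1 l with
    | nil => exact absurd hws (split1_ne_nil l)
    | cons w ws => exact ⟨w, ws, rfl⟩
  simp [hw]

-- words produced by split1 contain no space
theorem split1_no_space (l : List Char) : ∀ w ∈ split1 l, ' ' ∉ w := by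
  induction l with
  | nil => simp [split1]
  | cons c rest ih =>
    simp only [split1]
    split_ifs with hc
    · intro w hw
      rcases List.mem_cons.1 hw with hw | hw
      · simp [hw]
      · exact ih w hw
    · cases hws : split1 rest with
      | nil => exact absurd hws (split1_ne_nil rest)
      | cons w0 ws =>
        intro w hw
        rcases List.mem_cons.1 hw with hw | hw
        · subst hw
          intro hmem
          rcases List.mem_cons.1 hmem with hmem | hmem
          · exact hc hmem.symm
          · exact ih w0 (by rw [hws]; exact List.mem_cons_self) hmem
        · exact ih w (by rw [hws]; exact List.mem_cons_of_mem _ hw)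

theorem lowerChar_eq_space_iff (c : Char) : PySem.Chars.lowerChar c = ' ' ↔ c = ' ' := by
  have hA : ('A':Char).toNat = 65 := rfl
  have hZ : ('Z':Char).toNat = 90 := rfl
  have hsp : (' ':Char).toNat = 32 := rfl
  unfold PySem.Chars.lowerChar PySem.Chars.isupper
  simp only [Bool.and_eq_true, decide_eq_true_eq, charLe, hA, hZ]
  split_ifs with h
  · simp only [charEq, Char.toNat_ofNat, Nat.isValidChar, hsp]
    split_ifs <;> omega
  · rfl

theorem split1_lower (l : List Char) :
    split1 (PySem.Chars.lower l) = (split1 l).map PySem.Chars.lower := by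
  induction l with
  | nil => simp [split1, PySem.Chars.lower]
  | cons c rest ih =>
    simp only [PySem.Chars.lower, List.map_cons] at ih ⊢
    simp only [split1]
    by_cases hc : c = ' '
    · rw [if_pos ((lowerChar_eq_space_iff c).2 hc), if_pos hc, ih]
      simp [PySem.Chars.lower]
    · rw [if_neg (fun h => hc ((lowerChar_eq_space_iff c).1 h)), if_neg hc, ih]
      cases hws : split1 rest with
      | nil => exact absurd hws (split1_ne_nil rest)
      | cons w ws => simp [PySem.Chars.lower]

-- re-joining the split words with spaces gives back the string
def joinWords : List (List Char) → List Char
  | [] => []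
  | [w] => w
  | w :: ws => w ++ ' ' :: joinWords ws

theorem joinWords_split1 (l : List Char) : joinWords (split1 l) = l := by
  induction l with
  | nil => simp [split1, joinWords]
  | cons c rest ih =>
    simp only [split1]
    split_ifs with hc
    · cases hws : split1 rest with
      | nil => exact absurd hws (split1_ne_nil rest)
      | cons w ws =>
        rw [hws] at ih
        subst hc
        simp [joinWords, ih]
    · cases hws : split1 rest with
      | nil => exact absurd hws (split1_ne_nil rest)
      | cons w ws =>
        rw [hws] at ih
        cases ws with
        | nil => simp [joinWords] at ih ⊢; exact ih
        | cons w2 ws2 => simp [joinWords] at ih ⊢; rw [ih]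

-- B's per-word match count
def countB (key : String) (w : List Char) : Int :=
  (w.countP (fun c => String.ofList [c] == key) : Int)

-- scanning the characters of a space-free word only accumulates
theorem scan_word (key : String) (w : List Char) (hw : ' ' ∉ w) :
    ∀ (d : PySem.Dict String Int) (cur : List Char) (cnt : Int),
    w.foldl (bStep key) (d, cur, cnt) = (d, cur ++ w, cnt + countB key w) := by
  induction w with
  | nil => intro d cur cnt; simp [countB]
  | cons c rest ih =>
    intro d cur cnt
    have hc : c ≠ ' ' := fun h => hw (h ▸ List.mem_cons_self)
    simp only [List.foldl_cons, bStep, if_neg hc]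
    rw [ih (fun h => hw (List.mem_cons_of_mem _ h)) d (cur ++ [c])]
    simp only [List.append_assoc, List.singleton_append, countB, List.countP_cons]
    split_ifs with h <;> simp <;> ring

-- scanning all words joined by spaces, with a trailing sentinel space, folds insertions over the words
theorem scan_words (key : String) (ws : List (List Char)) (hws : ∀ w ∈ ws, ' ' ∉ w) (hne : ws ≠ []) :
    ∀ (d : PySem.Dict String Int),
    (joinWords ws ++ [' ']).foldl (bStep key) (d, ([] : List Char), (0 : Int))
      = (ws.foldl (fun d w => d.insert (String.ofList w) (countB key w)) d, [], 0) := by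
  induction ws with
  | nil => exact absurd rfl hne
  | cons w rest ih =>
    intro d
    cases rest with
    | nil =>
      simp only [joinWords, List.foldl_append]
      rw [scan_word key w (hws w List.mem_cons_self)]
      simp [bStep]
    | cons w2 rest2 =>
      have hj : joinWords (w :: w2 :: rest2) = w ++ ' ' :: joinWords (w2 :: rest2) := rfl
      rw [hj, List.append_assoc, List.foldl_append,
        scan_word key w (hws w List.mem_cons_self)]
      have hstep : (' ' :: (joinWords (w2 :: rest2) ++ [' '])).foldl (bStep key)
          (d, [] ++ w, 0 + countB key w)
          = (joinWords (w2 :: rest2) ++ [' ']).foldl (bStep key)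
            (d.insert (String.ofList w) (countB key w), [], 0) := by
        simp [bStep]
      rw [show (' ' :: joinWords (w2 :: rest2)) ++ [' ']
            = ' ' :: (joinWords (w2 :: rest2) ++ [' ']) from rfl]
      rw [hstep, ih (fun v hv => hws v (List.mem_cons_of_mem _ hv)) (by simp)]
      simp

-- A's inner counting loop equals B's count on the lowered word
theorem countA_eq (ch : String) (w : List Char) :
    w.foldl (fun (count : Int) j =>
        if (String.ofList [j] == PySem.Str.upper ch || String.ofList [j] == PySem.Str.lower ch) = true
        then count + 1 else count) 0
      = countB (PySem.Str.lower ch) (PySem.Chars.lower w) := by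
  rw [PySem.List.foldl_count_if]
  simp only [countB, PySem.Chars.lower, List.countP_map]
  norm_num
  apply List.countP_congr
  intro j _
  simp only [Function.comp_apply, condFact j ch]

-- ===== VERDICT (by name: the statement is the Claim_ definition above) =====
theorem find_occurrences_spec : Claim_equal_find_occurrences := by
  intro txt ch _
  unfold Spec_find_occurrences find_occurrences find_occurrences_alt
  simp only
  -- A's word list as a character-level split
  have hsplit : ∃ L : List String, PySem.Str.split? txt " " = some L ∧
      L.map String.toList = split1 txt.toList := by
    have h := PySem.Str.split?_map txt " "
    rw [show (" " : String).toList = [' '] from rfl] at h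
    unfold PySem.Chars.split? at h
    cases hL : PySem.Str.split? txt " " with
    | none => rw [hL] at h; simp at h
    | some L =>
      rw [hL] at h
      simp at h
      exact ⟨L, rfl, by rw [h, splitOn_space]⟩
  obtain ⟨L, hL, hmap⟩ := hsplit
  rw [hL]
  simp only [Option.getD_some]
  -- rewrite A's fold over strings as a fold over their character lists
  have hA : L.foldl (fun (output : PySem.Dict String Int) i =>
      output.insert (PySem.Str.lower i)
        (i.toList.foldl (fun (count : Int) j =>
          if (String.ofList [j] == PySem.Str.upper ch || String.ofList [j] == PySem.Str.lower ch) = true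
          then count + 1 else count) 0)) PySem.Dict.empty
      = (split1 txt.toList).foldl (fun (output : PySem.Dict String Int) w =>
          output.insert (String.ofList (PySem.Chars.lower w))
            (countB (PySem.Str.lower ch) (PySem.Chars.lower w))) PySem.Dict.empty := by
    rw [← hmap, List.foldl_map]
    apply PySem.List.foldl_congr_mem
    intro d i _
    rw [countA_eq]
    rfl
  rw [hA]
  -- B's scan, expressed over the same split
  have hB : ((PySem.Str.lower txt).toList ++ [' ']).foldl (bStep (PySem.Str.lower ch))
      (PySem.Dict.empty, ([] : List Char), (0 : Int))
      = ((split1 txt.toList).foldl (fun (d : PySem.Dict String Int) w =>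
          d.insert (String.ofList (PySem.Chars.lower w))
            (countB (PySem.Str.lower ch) (PySem.Chars.lower w))) PySem.Dict.empty, [], 0) := by
    rw [PySem.Str.toList_lower,
      show PySem.Chars.lower txt.toList = joinWords (split1 (PySem.Chars.lower txt.toList)) from
        (joinWords_split1 _).symm,
      scan_words (PySem.Str.lower ch) _ (split1_no_space _) (split1_ne_nil _),
      split1_lower, List.foldl_map]
  rw [hB]
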